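-- pv_equiv track=rewrite | github.com/abel1502/c_to_python_hack | pack_c.py | gather_libc_relocs
-- ===== SOURCE A (Python) =====
-- def gather_libc_relocs(mapping: dict[str, int]) -> dict[str, int]:
--     libc_relocs: dict[str, int] = {}
--     collect: bool = False
--
--     for name, offs in mapping.items():
--         if name == "__libc_imp_start":
--             collect = True
--             continue
--         if name == "__libc_imp_end":
--             collect = False
--             break
--
--         if collect:
--             libc_relocs[name] = offs
--
--     return libc_relocs
-- ===== SOURCE B (Python) =====
-- def gather_libc_relocs(mapping: dict[str, int]) -> dict[str, int]:
--     items = list(mapping.items())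
--     keys = [name for name, _ in items]
--     try:
--         start = keys.index("__libc_imp_start")
--     except ValueError:
--         return {}
--     try:
--         end = keys.index("__libc_imp_end")
--     except ValueError:
--         end = len(items)
--     if end < start:
--         return {}
--     return dict(items[start + 1:end])
-- ===== Notes on version B (the rewrite author's own statement) =====
-- stated objective: alternative
-- what changed: Replaces A's single stateful flag-and-break scan with a two-phase locate-then-slice: find the first indices of the two sentinel keys in the key list, then return dict(items[start+1:end]) (empty if start is missing or end precedes start).
import Mathlib
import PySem

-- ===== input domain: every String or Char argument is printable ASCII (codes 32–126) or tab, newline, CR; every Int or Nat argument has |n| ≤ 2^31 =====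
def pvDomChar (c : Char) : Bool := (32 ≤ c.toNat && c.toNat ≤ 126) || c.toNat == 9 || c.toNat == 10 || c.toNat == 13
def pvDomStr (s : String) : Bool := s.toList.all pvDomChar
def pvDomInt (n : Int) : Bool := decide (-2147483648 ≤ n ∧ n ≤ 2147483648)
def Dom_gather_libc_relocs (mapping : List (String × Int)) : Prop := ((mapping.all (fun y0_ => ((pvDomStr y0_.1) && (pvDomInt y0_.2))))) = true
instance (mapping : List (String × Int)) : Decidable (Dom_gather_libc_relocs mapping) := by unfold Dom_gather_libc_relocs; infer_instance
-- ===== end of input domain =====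

-- B replaces A's stateful flag-scan with locate-the-sentinels-then-slice (different decomposition, same cost).


-- ===== PORT A =====
-- the for-loop over mapping.items() with state (libc_relocs, collect); 'break' returns the accumulator
def gatherAuxA : List (String × Int) → PySem.Dict String Int → Bool → PySem.Dict String Int
  | [], acc, _ => acc
  | (name, offs) :: rest, acc, collect =>
    if name = "__libc_imp_start" then gatherAuxA rest acc true
    else if name = "__libc_imp_end" then acc
    else gatherAuxA rest (if collect then acc.insert name offs else acc) collect

def gather_libc_relocs (mapping : List (String × Int)) : List (String × Int) :=
  (gatherAuxA mapping PySem.Dict.empty false).items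

-- ===== PORT B =====
def gather_libc_relocs_alt (mapping : List (String × Int)) : List (String × Int) :=
  let keys := mapping.map Prod.fst
  match PySem.List.index? keys "__libc_imp_start" with
  | none => []
  | some start =>
    let «end» : Nat := (PySem.List.index? keys "__libc_imp_end").getD mapping.length
    if «end» < start then []
    else (PySem.Dict.ofList (PySem.List.slice mapping (some ((start : Int) + 1)) (some («end» : Int)))).items

-- ===== PRECONDITION & SPEC =====
-- The argument is a Python dict, whose association-list encoding has pairwise-distinct keys;
-- lists with duplicate keys encode no dict[str, int] input, so Pre_ excludes only them.
def Pre_gather_libc_relocs (mapping : List (String × Int)) : Prop := (mapping.map Prod.fst).Nodup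
instance (mapping : List (String × Int)) : Decidable (Pre_gather_libc_relocs mapping) := by unfold Pre_gather_libc_relocs; infer_instance
def pvWitness_gather_libc_relocs : (List (String × Int)) := ([("__libc_imp_start", 1), ("puts", 8), ("__libc_imp_end", 0), ("tail", 3)])
def Spec_gather_libc_relocs (mapping : List (String × Int)) (out : List (String × Int)) : Prop := out = gather_libc_relocs_alt mapping
instance (mapping : List (String × Int)) (out : List (String × Int)) : Decidable (Spec_gather_libc_relocs mapping out) := by unfold Spec_gather_libc_relocs; infer_instance

-- ===== CLAIM (what is proved, stated in full; the proofs are below) =====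
def Claim_equal_gather_libc_relocs : Prop := ∀ (mapping : List (String × Int)), Dom_gather_libc_relocs mapping → Pre_gather_libc_relocs mapping → Spec_gather_libc_relocs mapping (gather_libc_relocs mapping)

-- ===== LEMMAS AND PROOFS =====

-- a dict built from an association list with distinct keys is that list
theorem ofList_items_of_nodup (t : List (String × Int)) (h : (t.map Prod.fst).Nodup) :
    (PySem.Dict.ofList t).items = t := by
  show (List.foldl (fun acc p => acc.insert p.1 p.2) PySem.Dict.empty t).items = t
  rw [PySem.Dict.items_foldl_insert_fresh t Prod.fst Prod.snd PySem.Dict.empty (by simp) h]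
  simp [PySem.Dict.empty]

-- once collecting, A appends the entries up to the first end sentinel (start no longer occurs)
theorem gatherAuxA_collect (l : List (String × Int))
    (hS : "__libc_imp_start" ∉ l.map Prod.fst) (hnd : (l.map Prod.fst).Nodup) :
    ∀ acc : PySem.Dict String Int, (∀ k ∈ l.map Prod.fst, acc.contains k = false) →
    (gatherAuxA l acc true).items =
      acc.items ++ l.take ((PySem.List.index? (l.map Prod.fst) "__libc_imp_end").getD l.length) := by
  induction l with
  | nil => intro acc _; simp [gatherAuxA]
  | cons p rest ih =>
    obtain ⟨n, v⟩ := p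
    intro acc hfresh
    simp only [List.map_cons] at hS hnd ⊢
    have hnS : n ≠ "__libc_imp_start" := fun h => hS (h ▸ List.mem_cons_self)
    by_cases hnE : n = "__libc_imp_end"
    · subst hnE
      rw [PySem.List.index?_cons_self]
      simp [gatherAuxA]
    · have hrec : gatherAuxA ((n, v) :: rest) acc true = gatherAuxA rest (acc.insert n v) true := by
        simp [gatherAuxA, hnS, hnE]
      rw [hrec, PySem.List.index?_cons_of_ne (rest.map Prod.fst) hnE]
      have hnrest : n ∉ rest.map Prod.fst := (List.nodup_cons.mp hnd).1
      have hacc_n : acc.contains n = false := hfresh n List.mem_cons_self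
      rw [ih (fun h => hS (List.mem_cons_of_mem _ h)) (List.nodup_cons.mp hnd).2
          (acc.insert n v)
          (by
            intro k hk
            rw [PySem.Dict.contains_insert]
            have : k ≠ n := fun h => hnrest (h ▸ hk)
            simp [this, hfresh k (List.mem_cons_of_mem _ hk)])]
      rw [PySem.Dict.items_insert_of_not_contains acc v hacc_n]
      cases hE : PySem.List.index? (rest.map Prod.fst) "__libc_imp_end" with
      | none => simp
      | some j => simp

-- ===== VERDICT (by name: the statement is the Claim_ definition above) =====
theorem gather_libc_relocs_spec : Claim_equal_gather_libc_relocs := by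
  unfold Claim_equal_gather_libc_relocs
  intro mapping hdom hpre
  unfold Spec_gather_libc_relocs
  induction mapping with
  | nil => rfl
  | cons p rest ih =>
    obtain ⟨n, v⟩ := p
    simp only [Pre_gather_libc_relocs, List.map_cons, List.nodup_cons] at hpre
    obtain ⟨hn, hnd⟩ := hpre
    have hdomr : Dom_gather_libc_relocs rest := by
      simp only [Dom_gather_libc_relocs, List.all_cons, Bool.and_eq_true] at hdom ⊢
      exact hdom.2
    by_cases hS : n = "__libc_imp_start"
    · subst hS
      -- A collects the tail up to the first end marker
      have hA : gather_libc_relocs (("__libc_imp_start", v) :: rest) =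
          rest.take ((PySem.List.index? (rest.map Prod.fst) "__libc_imp_end").getD rest.length) := by
        show (gatherAuxA (("__libc_imp_start", v) :: rest) PySem.Dict.empty false).items = _
        have : gatherAuxA (("__libc_imp_start", v) :: rest) PySem.Dict.empty false
             = gatherAuxA rest PySem.Dict.empty true := by simp [gatherAuxA]
        rw [this, gatherAuxA_collect rest hn hnd PySem.Dict.empty (by simp [PySem.Dict.empty, PySem.Dict.contains])]
        simp [PySem.Dict.empty]
      rw [hA]
      -- B: start index is 0, slice from position 1 to the end index
      unfold gather_libc_relocs_alt
      simp only [List.map_cons, PySem.List.index?_cons_self]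
      have hSE : ("__libc_imp_start" : String) ≠ "__libc_imp_end" := by decide
      rw [PySem.List.index?_cons_of_ne (rest.map Prod.fst) hSE]
      set j := (PySem.List.index? (rest.map Prod.fst) "__libc_imp_end").getD rest.length with hj
      have hgetD : (Option.map (fun x => x + 1) (PySem.List.index? (rest.map Prod.fst) "__libc_imp_end")).getD
          (("__libc_imp_start", v) :: rest).length = j + 1 := by
        cases hE : PySem.List.index? (rest.map Prod.fst) "__libc_imp_end" with
        | none => rw [hj, hE]; simp
        | some k => rw [hj, hE]; simp
      rw [hgetD]
      simp only [Nat.cast_zero, zero_add]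
      have hslice : PySem.List.slice (("__libc_imp_start", v) :: rest) (some (1 : Int)) (some ((j + 1 : Nat) : Int))
          = rest.take j := by
        have h1 : (1 : Int) = ((1 : Nat) : Int) := by norm_num
        rw [h1, PySem.List.slice_natCast]
        simp
      rw [hslice, ofList_items_of_nodup]
      · simp
      · rw [List.map_take]; exact hnd.sublist (List.take_sublist j (rest.map Prod.fst))
    · by_cases hE : n = "__libc_imp_end"
      · subst hE
        -- A returns {} immediately; B: either start is absent, or end (index 0) precedes start
        have hA : gather_libc_relocs (("__libc_imp_end", v) :: rest) = [] := by
          show (gatherAuxA (("__libc_imp_end", v) :: rest) PySem.Dict.empty false).items = []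
          simp [gatherAuxA, PySem.Dict.empty]
        rw [hA]
        unfold gather_libc_relocs_alt
        have hES : ("__libc_imp_end" : String) ≠ "__libc_imp_start" := by decide
        simp only [List.map_cons, PySem.List.index?_cons_self]
        rw [PySem.List.index?_cons_of_ne (rest.map Prod.fst) hES]
        cases hSidx : PySem.List.index? (rest.map Prod.fst) "__libc_imp_start" with
        | none => simp
        | some i => simp
      · -- ordinary head: A skips it (collect is false); B's indices all shift by one
        have hA : gather_libc_relocs ((n, v) :: rest) = gather_libc_relocs rest := by
          show (gatherAuxA ((n, v) :: rest) PySem.Dict.empty false).items = _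
          simp [gatherAuxA, hS, hE, gather_libc_relocs]
        rw [hA, ih hdomr hnd]
        unfold gather_libc_relocs_alt
        simp only [List.map_cons]
        rw [PySem.List.index?_cons_of_ne (rest.map Prod.fst) (fun h => hS h),
            PySem.List.index?_cons_of_ne (rest.map Prod.fst) (fun h => hE h)]
        cases hSidx : PySem.List.index? (rest.map Prod.fst) "__libc_imp_start" with
        | none => simp
        | some i =>
          simp only [Option.map_some]
          set j := (PySem.List.index? (rest.map Prod.fst) "__libc_imp_end").getD rest.length with hj
          have hgetD : (Option.map (fun x => x + 1) (PySem.List.index? (rest.map Prod.fst) "__libc_imp_end")).getD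
              (((n, v) :: rest).length) = j + 1 := by
            cases hEidx : PySem.List.index? (rest.map Prod.fst) "__libc_imp_end" with
            | none => rw [hj, hEidx]; simp
            | some k => rw [hj, hEidx]; simp
          rw [hgetD]
          by_cases hlt : j < i
          · have hlt' : j + 1 < i + 1 := by omega
            simp [hlt, hlt']
          · have hlt' : ¬ (j + 1 < i + 1) := by omega
            simp only [hlt, hlt', if_false]
            have hcast1 : ((i + 1 : Nat) : Int) + 1 = ((i + 2 : Nat) : Int) := by push_cast; ring
            have hcast2 : ((i : Nat) : Int) + 1 = ((i + 1 : Nat) : Int) := by push_cast; ring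
            rw [hcast1, hcast2, PySem.List.slice_natCast, PySem.List.slice_natCast]
            have hdrop : List.drop (i + 2) ((n, v) :: rest) = List.drop (i + 1) rest := rfl
            rw [hdrop]
            have hsub : j + 1 - (i + 2) = j - (i + 1) := by omega
            rw [hsub]
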